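-- pv_equiv track=rewrite | github.com/clsmith70/AOC | day9/solution.py | get_contiguous_ranges
-- ===== SOURCE A (Python) =====
-- def get_contiguous_ranges(disk_map: list, item: int | str) -> list:
--     # return the slices of contiguous free space on disk
--     ranges = []
--     start = None
--     for index, value in enumerate(disk_map):
--         if value == item:
--             if start is None:
--                 start = index
--         elif start is not None:
--             ranges.append((start, index - 1))
--             start = None
--     if start is not None:
--         ranges.append((start, len(disk_map) - 1))
--
--     return ranges
-- ===== SOURCE B (Python) =====
-- def get_contiguous_ranges(disk_map: list, item: int | str) -> list:
--     # return the slices of contiguous free space on disk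
--     ranges = []
--     i, n = 0, len(disk_map)
--     while i < n:
--         if disk_map[i] == item:
--             j = i + 1
--             while j < n and disk_map[j] == item:
--                 j += 1
--             ranges.append((i, j - 1))
--             i = j
--         else:
--             i += 1
--     return ranges
-- ===== Notes on version B (the rewrite author's own statement) =====
-- stated objective: alternative
-- what changed: Replaces A's one-element-at-a-time state machine (start/None sentinel plus a trailing-run closeout after the loop) by an index-based run scanner: an outer while finds the start of a run of item, an inner while advances to its end, and the (start, end) pair is emitted immediately, so no sentinel state or post-loop cleanup exists.
import Mathlib
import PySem

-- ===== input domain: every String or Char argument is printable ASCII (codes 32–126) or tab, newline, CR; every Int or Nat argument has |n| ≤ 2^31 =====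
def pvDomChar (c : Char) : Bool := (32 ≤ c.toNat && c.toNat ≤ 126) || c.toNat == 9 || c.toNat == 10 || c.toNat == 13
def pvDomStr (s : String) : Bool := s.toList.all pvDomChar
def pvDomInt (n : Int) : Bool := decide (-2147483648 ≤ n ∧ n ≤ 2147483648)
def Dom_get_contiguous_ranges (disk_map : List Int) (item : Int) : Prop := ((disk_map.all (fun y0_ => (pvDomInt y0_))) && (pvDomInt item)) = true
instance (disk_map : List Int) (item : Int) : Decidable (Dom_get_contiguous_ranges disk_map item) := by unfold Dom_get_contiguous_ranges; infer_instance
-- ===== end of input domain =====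

-- B replaces A's start/None state machine by a two-level run-scanning index loop (alternative decomposition, same O(n) cost).

-- ===== PORT A =====
-- A's for-loop over enumerate(disk_map) with state (ranges, start); idx is the enumerate counter
def pvALoop (item : Int) : List Int → Int → List (Int × Int) → Option Int → List (Int × Int) × Option Int
  | [], _, ranges, start => (ranges, start)
  | v :: rest, idx, ranges, start =>
    if v = item then
      match start with
      | none => pvALoop item rest (idx + 1) ranges (some idx)
      | some s => pvALoop item rest (idx + 1) ranges (some s)
    else
      match start with
      | some s => pvALoop item rest (idx + 1) (ranges ++ [(s, idx - 1)]) none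
      | none => pvALoop item rest (idx + 1) ranges none

def get_contiguous_ranges (disk_map : List Int) (item : Int) : List (Int × Int) :=
  match pvALoop item disk_map 0 [] none with
  | (ranges, some s) => ranges ++ [(s, (disk_map.length : Int) - 1)]
  | (ranges, none) => ranges

-- ===== PORT B =====
-- Python's inner `while j < n and disk_map[j] == item: j += 1`.
-- disk_map[j] is in range whenever the condition tests it (j < n), so List.getD is exact here.
def pvFindEnd (disk_map : List Int) (item : Int) (n j : Nat) : Nat :=
  if j < n ∧ disk_map.getD j 0 = item then pvFindEnd disk_map item n (j + 1) else j
termination_by n - j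
decreasing_by omega

theorem pvFindEnd_ge (disk_map : List Int) (item : Int) (n j : Nat) :
    j ≤ pvFindEnd disk_map item n j := by
  fun_induction pvFindEnd disk_map item n j <;> omega

-- Python's outer `while i < n:` loop; disk_map[i] in range since i < n
def pvBLoop (disk_map : List Int) (item : Int) (n i : Nat) : List (Int × Int) :=
  if i < n then
    if disk_map.getD i 0 = item then
      let j := pvFindEnd disk_map item n (i + 1)
      ((i : Int), (j : Int) - 1) :: pvBLoop disk_map item n j
    else pvBLoop disk_map item n (i + 1)
  else []
termination_by n - i
decreasing_by
  · have := pvFindEnd_ge disk_map item n (i + 1); omega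
  · omega

def get_contiguous_ranges_alt (disk_map : List Int) (item : Int) : List (Int × Int) :=
  pvBLoop disk_map item disk_map.length 0

-- ===== PRECONDITION & SPEC =====
def Spec_get_contiguous_ranges (disk_map : List Int) (item : Int) (out : List (Int × Int)) : Prop := out = get_contiguous_ranges_alt disk_map item
instance (disk_map : List Int) (item : Int) (out : List (Int × Int)) : Decidable (Spec_get_contiguous_ranges disk_map item out) := by unfold Spec_get_contiguous_ranges; infer_instance

-- ===== CLAIM (what is proved, stated in full; the proofs are below) =====
def Claim_equal_get_contiguous_ranges : Prop := ∀ (disk_map : List Int) (item : Int), Dom_get_contiguous_ranges disk_map item → Spec_get_contiguous_ranges disk_map item (get_contiguous_ranges disk_map item)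

-- ===== LEMMAS AND PROOFS =====

-- reference function: runs of `item`, expressed structurally with takeWhile/dropWhile
def pvR (item : Int) (idx : Int) : List Int → List (Int × Int)
  | [] => []
  | v :: rest =>
    if v = item then
      (idx, idx + ((rest.takeWhile (fun w => w == item)).length : Int)) ::
        pvR item (idx + ((rest.takeWhile (fun w => w == item)).length : Int) + 1)
          (rest.dropWhile (fun w => w == item))
    else pvR item (idx + 1) rest
termination_by l => l.length
decreasing_by
  · have := List.length_dropWhile_le (fun w : Int => w == item) rest
    simp at *; omega
  · simp

def pvFinalize (p : List (Int × Int) × Option Int) (L : Int) : List (Int × Int) :=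
  match p.2 with
  | some s => p.1 ++ [(s, L - 1)]
  | none => p.1

theorem pvA_eq_R (item : Int) : ∀ xs : List Int,
    (∀ (idx : Int) (ranges : List (Int × Int)),
      pvFinalize (pvALoop item xs idx ranges none) (idx + xs.length) = ranges ++ pvR item idx xs)
    ∧ (∀ (idx s : Int) (ranges : List (Int × Int)),
      pvFinalize (pvALoop item xs idx ranges (some s)) (idx + xs.length)
        = ranges ++ (s, idx + ((xs.takeWhile (fun w => w == item)).length : Int) - 1) ::
            pvR item (idx + ((xs.takeWhile (fun w => w == item)).length : Int))
              (xs.dropWhile (fun w => w == item))) := by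
  intro xs
  induction xs with
  | nil =>
    constructor
    · intro idx ranges; simp [pvALoop, pvFinalize, pvR]
    · intro idx s ranges; simp [pvALoop, pvFinalize, pvR]
  | cons v rest ih =>
    obtain ⟨ihN, ihS⟩ := ih
    constructor
    · intro idx ranges
      by_cases hv : v = item
      · have := ihS (idx + 1) idx ranges
        simp [pvALoop, hv, pvR]
        rw [show idx + ((rest.length : Int) + 1) = (idx + 1) + (rest.length : Int) by ring]
        rw [this]
        congr 2
        · ring_nf
        · congr 1; ring
      · have := ihN (idx + 1) ranges
        simp [pvALoop, hv, pvR]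
        rw [show idx + ((rest.length : Int) + 1) = (idx + 1) + (rest.length : Int) by ring]
        rw [this]
    · intro idx s ranges
      by_cases hv : v = item
      · have := ihS (idx + 1) s ranges
        simp [pvALoop, hv]
        rw [show idx + ((rest.length : Int) + 1) = (idx + 1) + (rest.length : Int) by ring]
        rw [this]
        congr 2
        · congr 1; push_cast; ring
        · congr 1; push_cast; ring
      · have := ihN (idx + 1) (ranges ++ [(s, idx - 1)])
        simp [pvALoop, hv]
        rw [show idx + ((rest.length : Int) + 1) = (idx + 1) + (rest.length : Int) by ring]
        rw [this]
        simp [pvR, hv]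

theorem pvFindEnd_spec (disk_map : List Int) (item : Int) :
    ∀ j, pvFindEnd disk_map item disk_map.length j
      = j + ((disk_map.drop j).takeWhile (fun w => w == item)).length := by
  intro j
  fun_induction pvFindEnd disk_map item disk_map.length j with
  | case1 j h ih =>
    obtain ⟨hj, hv⟩ := h
    rw [List.drop_eq_getElem_cons hj]
    rw [List.getD_eq_getElem disk_map 0 hj] at hv
    simp [List.takeWhile_cons, hv, ih]
    omega
  | case2 j h =>
    by_cases hj : j < disk_map.length
    · have hv : ¬ disk_map.getD j 0 = item := by tauto
      rw [List.drop_eq_getElem_cons hj]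
      rw [List.getD_eq_getElem disk_map 0 hj] at hv
      simp [List.takeWhile_cons, hv]
    · rw [List.drop_eq_nil_of_le (by omega)]; simp

theorem pvDropLenTakeWhile (item : Int) : ∀ l : List Int,
    l.drop ((l.takeWhile (fun w => w == item)).length) = l.dropWhile (fun w => w == item) := by
  intro l
  induction l with
  | nil => simp
  | cons v rest ih =>
    by_cases hv : v = item
    · simp [List.takeWhile_cons, List.dropWhile_cons, hv, ih]
    · simp [List.takeWhile_cons, List.dropWhile_cons, hv]

theorem pvB_eq_R (disk_map : List Int) (item : Int) :
    ∀ i, pvBLoop disk_map item disk_map.length i = pvR item (i : Int) (disk_map.drop i) := by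
  intro i
  fun_induction pvBLoop disk_map item disk_map.length i with
  | case1 i hi hv j ih =>
    rw [List.drop_eq_getElem_cons hi]
    rw [List.getD_eq_getElem disk_map 0 hi] at hv
    rw [pvR]
    simp only [hv, if_true, eq_self_iff_true]
    have hj : j = i + 1 + ((disk_map.drop (i + 1)).takeWhile (fun w => w == item)).length :=
      pvFindEnd_spec disk_map item (i + 1)
    have hdrop : disk_map.drop j = (disk_map.drop (i + 1)).dropWhile (fun w => w == item) := by
      rw [hj, ← List.drop_drop, pvDropLenTakeWhile]
    rw [ih, hdrop]
    have hj' : (j : Int)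
        = (i : Int) + ((disk_map.drop (i + 1)).takeWhile (fun w => w == item)).length + 1 := by
      rw [hj]; push_cast; ring
    rw [hj']
    norm_num
  | case2 i hi hv ih =>
    rw [List.drop_eq_getElem_cons hi]
    rw [List.getD_eq_getElem disk_map 0 hi] at hv
    rw [pvR]
    simp only [hv, if_neg hv, ih]
    push_cast
    ring_nf
  | case3 i hi =>
    rw [List.drop_eq_nil_of_le (by omega)]
    simp [pvR]

-- ===== VERDICT (by name: the statement is the Claim_ definition above) =====
theorem get_contiguous_ranges_spec : Claim_equal_get_contiguous_ranges := by
  intro disk_map item _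
  unfold Spec_get_contiguous_ranges get_contiguous_ranges get_contiguous_ranges_alt
  have hA := (pvA_eq_R item disk_map).1 0 []
  have hB := pvB_eq_R disk_map item 0
  simp only [List.nil_append, zero_add, Nat.cast_zero, List.drop_zero] at hA hB
  rw [hB]
  rcases hE : pvALoop item disk_map 0 [] none with ⟨r, st⟩
  rw [hE] at hA
  cases st
  · simpa [pvFinalize] using hA
  · simpa [pvFinalize] using hA
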